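-- pv_equiv track=rewrite | github.com/maryem37/RagAndLoopVersionTestProject | agents/test_writer.py | _get_http_method_for_action
-- ===== SOURCE A (Python) =====
-- from typing import Dict, List, Optional, Tuple
--
-- def _get_http_method_for_action(text: str, endpoints: Dict[str, List[str]]) -> Tuple[Optional[str], Optional[str]]:
--     """Determine HTTP method and endpoint from step text and Swagger spec.
--     Returns (method, endpoint) or (None, None) if not found.
--     """
--     tl = text.lower()
--
--     # Define action patterns
--     if "submit" in tl or "create" in tl or "add" in tl:
--         method = "POST"
--     elif "update" in tl or "approv" in tl or "reject" in tl or "cancel" in tl: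
--         method = "PUT"
--     elif "delete" in tl or "remov" in tl:
--         method = "DELETE"
--     elif "get" in tl or "fetch" in tl or "search" in tl or "retriev" in tl or "view" in tl or "check" in tl:
--         method = "GET"
--     elif "login" in tl or "authenticat" in tl:
--         method = "POST"
--     else:
--         return None, None
--
--     # Find matching endpoint in Swagger spec
--     for endpoint, allowed_methods in endpoints.items():
--         if method in allowed_methods:
--             # Prioritize endpoints matching keywords from the step
--             if "login" in tl and "/login" in endpoint:
--                 return method, endpoint
--             if "request" in tl and "/request" in endpoint:
--                 return method, endpoint
--             if "balance" in tl and "/balance" in endpoint: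
--                 return method, endpoint
--             if "leave" in tl and "/leave" in endpoint:
--                 return method, endpoint
--             if "approve" in tl and "/approve" in endpoint:
--                 return method, endpoint
--             if "reject" in tl and "/reject" in endpoint:
--                 return method, endpoint
--             if "cancel" in tl and "/cancel" in endpoint:
--                 return method, endpoint
--
--     # Fall back to first matching endpoint with the method
--     for endpoint, allowed_methods in endpoints.items():
--         if method in allowed_methods:
--             return method, endpoint
--
--     return None, None
-- ===== SOURCE B (Python) =====
-- from typing import Dict, List, Optional, Tuple
--
-- _PRIORITY = [
--     ("login", "/login"),
--     ("request", "/request"),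
--     ("balance", "/balance"),
--     ("leave", "/leave"),
--     ("approve", "/approve"),
--     ("reject", "/reject"),
--     ("cancel", "/cancel"),
-- ]
--
-- def _get_http_method_for_action(text: str, endpoints: Dict[str, List[str]]) -> Tuple[Optional[str], Optional[str]]:
--     """Single pass: remember the first endpoint allowing the method as fallback,
--     return immediately on a priority-keyword match."""
--     tl = text.lower()
--
--     if "submit" in tl or "create" in tl or "add" in tl:
--         method = "POST"
--     elif "update" in tl or "approv" in tl or "reject" in tl or "cancel" in tl:
--         method = "PUT"
--     elif "delete" in tl or "remov" in tl:
--         method = "DELETE"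
--     elif "get" in tl or "fetch" in tl or "search" in tl or "retriev" in tl or "view" in tl or "check" in tl:
--         method = "GET"
--     elif "login" in tl or "authenticat" in tl:
--         method = "POST"
--     else:
--         return None, None
--
--     fallback = None
--     for endpoint, allowed_methods in endpoints.items():
--         if method in allowed_methods:
--             if fallback is None:
--                 fallback = endpoint
--             if any(kw in tl and frag in endpoint for kw, frag in _PRIORITY):
--                 return method, endpoint
--     if fallback is not None:
--         return method, fallback
--     return None, None
-- ===== Notes on version B (the rewrite author's own statement) =====
-- stated objective: simpler
-- what changed: The two separate endpoint loops (priority scan, then fallback scan) are fused into one pass over a (keyword, path-fragment) priority table: the first allowed endpoint is remembered as fallback while the loop returns immediately on a priority match, and the seven hard-coded if-chains become an any() over the table.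
import Mathlib
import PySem

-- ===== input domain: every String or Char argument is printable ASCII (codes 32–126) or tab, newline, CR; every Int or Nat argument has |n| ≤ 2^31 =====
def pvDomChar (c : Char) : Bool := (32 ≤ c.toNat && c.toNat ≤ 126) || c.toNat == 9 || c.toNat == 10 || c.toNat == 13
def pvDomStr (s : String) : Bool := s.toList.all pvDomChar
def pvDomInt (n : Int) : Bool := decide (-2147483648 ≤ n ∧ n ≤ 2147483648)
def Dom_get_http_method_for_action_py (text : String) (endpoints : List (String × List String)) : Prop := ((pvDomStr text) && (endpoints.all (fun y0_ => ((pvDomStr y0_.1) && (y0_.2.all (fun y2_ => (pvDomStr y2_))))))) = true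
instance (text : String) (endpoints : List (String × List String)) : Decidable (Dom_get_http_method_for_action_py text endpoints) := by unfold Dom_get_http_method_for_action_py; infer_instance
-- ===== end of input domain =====

-- B fuses A's two endpoint loops into one pass with a recorded fallback and a priority table (objective: simpler).

-- ===== PORT A =====
-- the method-keyword cascade, identical in both Pythons
def pvMethodFor (tl : String) : Option String :=
  if PySem.Str.isIn "submit" tl || PySem.Str.isIn "create" tl || PySem.Str.isIn "add" tl then some "POST"
  else if PySem.Str.isIn "update" tl || PySem.Str.isIn "approv" tl || PySem.Str.isIn "reject" tl || PySem.Str.isIn "cancel" tl then some "PUT"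
  else if PySem.Str.isIn "delete" tl || PySem.Str.isIn "remov" tl then some "DELETE"
  else if PySem.Str.isIn "get" tl || PySem.Str.isIn "fetch" tl || PySem.Str.isIn "search" tl || PySem.Str.isIn "retriev" tl || PySem.Str.isIn "view" tl || PySem.Str.isIn "check" tl then some "GET"
  else if PySem.Str.isIn "login" tl || PySem.Str.isIn "authenticat" tl then some "POST"
  else none

-- A's first loop: seven sequential if-return checks per allowed endpoint
def pvLoop1 (tl method : String) : List (String × List String) → Option String
  | [] => none
  | (endpoint, allowed) :: rest =>
    if allowed.contains method then
      if PySem.Str.isIn "login" tl && PySem.Str.isIn "/login" endpoint then some endpoint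
      else if PySem.Str.isIn "request" tl && PySem.Str.isIn "/request" endpoint then some endpoint
      else if PySem.Str.isIn "balance" tl && PySem.Str.isIn "/balance" endpoint then some endpoint
      else if PySem.Str.isIn "leave" tl && PySem.Str.isIn "/leave" endpoint then some endpoint
      else if PySem.Str.isIn "approve" tl && PySem.Str.isIn "/approve" endpoint then some endpoint
      else if PySem.Str.isIn "reject" tl && PySem.Str.isIn "/reject" endpoint then some endpoint
      else if PySem.Str.isIn "cancel" tl && PySem.Str.isIn "/cancel" endpoint then some endpoint
      else pvLoop1 tl method rest
    else pvLoop1 tl method rest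

-- A's second loop: first endpoint allowing the method
def pvLoop2 (method : String) : List (String × List String) → Option String
  | [] => none
  | (endpoint, allowed) :: rest =>
    if allowed.contains method then some endpoint else pvLoop2 method rest

def get_http_method_for_action_py (text : String) (endpoints : List (String × List String)) : Option String × Option String :=
  let tl := PySem.Str.lower text
  match pvMethodFor tl with
  | none => (none, none)
  | some method =>
    match pvLoop1 tl method endpoints with
    | some endpoint => (some method, some endpoint)
    | none =>
      match pvLoop2 method endpoints with
      | some endpoint => (some method, some endpoint)
      | none => (none, none)

-- ===== PORT B =====
def pvPriority : List (String × String) :=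
  [("login", "/login"), ("request", "/request"), ("balance", "/balance"),
   ("leave", "/leave"), ("approve", "/approve"), ("reject", "/reject"),
   ("cancel", "/cancel")]

-- B's single pass, carrying the fallback
def pvAltLoop (tl method : String) (fallback : Option String) : List (String × List String) → Option String × Option String
  | [] => match fallback with
    | some f => (some method, some f)
    | none => (none, none)
  | (endpoint, allowed) :: rest =>
    if allowed.contains method then
      let fb := match fallback with | none => some endpoint | some f => some f
      if pvPriority.any (fun p => PySem.Str.isIn p.1 tl && PySem.Str.isIn p.2 endpoint) then
        (some method, some endpoint)
      else pvAltLoop tl method fb rest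
    else pvAltLoop tl method fallback rest

def get_http_method_for_action_py_alt (text : String) (endpoints : List (String × List String)) : Option String × Option String :=
  let tl := PySem.Str.lower text
  match pvMethodFor tl with
  | none => (none, none)
  | some method => pvAltLoop tl method none endpoints

-- ===== PRECONDITION & SPEC =====
def Spec_get_http_method_for_action_py (text : String) (endpoints : List (String × List String)) (out : Option String × Option String) : Prop := out = get_http_method_for_action_py_alt text endpoints
instance (text : String) (endpoints : List (String × List String)) (out : Option String × Option String) : Decidable (Spec_get_http_method_for_action_py text endpoints out) := by unfold Spec_get_http_method_for_action_py; infer_instance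

-- ===== CLAIM (what is proved, stated in full; the proofs are below) =====
def Claim_equal_get_http_method_for_action_py : Prop := ∀ (text : String) (endpoints : List (String × List String)), Dom_get_http_method_for_action_py text endpoints → Spec_get_http_method_for_action_py text endpoints (get_http_method_for_action_py text endpoints)

-- ===== LEMMAS AND PROOFS =====
-- a two-branch if-chain with a shared `then` value folds into one disjunction
theorem pvIfChainOr {α : Type} (b1 b2 : Bool) (x y : α) :
    (if b1 then x else if b2 then x else y) = (if b1 || b2 then x else y) := by
  cases b1 <;> simp

-- A's seven sequential if-returns on the head endpoint equal one `any` over the priority table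
theorem pvLoop1_cons_head (tl method endpoint : String) (allowed : List String)
    (rest : List (String × List String)) (hc : allowed.contains method = true) :
    pvLoop1 tl method ((endpoint, allowed) :: rest) =
      if pvPriority.any (fun p => PySem.Str.isIn p.1 tl && PySem.Str.isIn p.2 endpoint) then
        some endpoint
      else pvLoop1 tl method rest := by
  simp only [pvLoop1, hc, if_true, pvPriority, List.any_cons, List.any_nil, Bool.or_false,
    pvIfChainOr]

-- the fused loop equals: priority scan first, else the carried fallback, else the fallback scan
theorem pvAltLoop_eq (tl method : String) (l : List (String × List String)) :
    ∀ fb : Option String, pvAltLoop tl method fb l =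
      match pvLoop1 tl method l with
      | some endpoint => (some method, some endpoint)
      | none =>
        match fb.orElse (fun _ => pvLoop2 method l) with
        | some endpoint => (some method, some endpoint)
        | none => (none, none) := by
  induction l with
  | nil => intro fb; cases fb <;> simp [pvAltLoop, pvLoop1, pvLoop2, Option.orElse]
  | cons hd rest ih =>
    intro fb
    obtain ⟨endpoint, allowed⟩ := hd
    by_cases hc : allowed.contains method = true
    · rw [pvLoop1_cons_head tl method endpoint allowed rest hc]
      simp only [pvAltLoop, pvLoop2, hc, if_true]
      by_cases hp : (pvPriority.any (fun p => PySem.Str.isIn p.1 tl && PySem.Str.isIn p.2 endpoint)) = true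
      · simp only [hp, if_true]
      · simp only [Bool.not_eq_true] at hp
        simp only [hp, Bool.false_eq_true, if_false]
        rw [ih]
        cases fb <;> cases hl : pvLoop1 tl method rest <;> simp [Option.orElse]
    · simp only [Bool.not_eq_true] at hc
      simp only [pvAltLoop, pvLoop1, pvLoop2, hc, Bool.false_eq_true, if_false]
      exact ih fb

-- ===== VERDICT (by name: the statement is the Claim_ definition above) =====
theorem get_http_method_for_action_py_spec : Claim_equal_get_http_method_for_action_py := by
  intro text endpoints _
  unfold Spec_get_http_method_for_action_py get_http_method_for_action_py get_http_method_for_action_py_alt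
  cases hm : pvMethodFor (PySem.Str.lower text) with
  | none => simp [hm]
  | some method =>
    simp only [hm, pvAltLoop_eq]
    cases hl : pvLoop1 (PySem.Str.lower text) method endpoints <;> simp [Option.orElse]
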